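-- pv_equiv track=rewrite | github.com/Studio-Yandex-Practicum/you_can_bot | src/backend/api/calculation_service/task_3.py | _make_top_scales_by_scores
-- ===== SOURCE A (Python) =====
-- TOP_RESULTS_NUMBER = 3
--
-- def _make_top_scales_by_scores(
--     scale_scores_sorted: list[tuple[str, int]]
-- ) -> list[tuple[str, int]]:
--     """
--     Выбирает шкалы (топ-3), набравшие максимальное кол-во баллов.
--     В случае, если шкалы, не вошедшие в топ-3, набрали столько же баллов,
--     что и шкала на 3 месте, добавляет их в выборку.
--     """
--     user_top_features = scale_scores_sorted[:TOP_RESULTS_NUMBER]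
--     for scale, score in scale_scores_sorted[TOP_RESULTS_NUMBER:]:
--         if score != user_top_features[-1][-1]:
--             return user_top_features
--         user_top_features.append((scale, score))
--     return user_top_features
-- ===== SOURCE B (Python) =====
-- TOP_RESULTS_NUMBER = 3
--
--
-- def _make_top_scales_by_scores(
--     scale_scores_sorted: list[tuple[str, int]]
-- ) -> list[tuple[str, int]]:
--     """Consume whole runs of consecutive equal scores, recursively, until at
--     least TOP_RESULTS_NUMBER entries have been collected."""
--     def next_run_length(pairs):
--         n = 1
--         while n < len(pairs) and pairs[n][1] == pairs[0][1]:
--             n += 1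
--         return n
--
--     def take_runs(pairs, need):
--         if need <= 0 or not pairs:
--             return []
--         n = next_run_length(pairs)
--         return pairs[:n] + take_runs(pairs[n:], need - n)
--
--     return take_runs(scale_scores_sorted, TOP_RESULTS_NUMBER)
-- ===== Notes on version B (the rewrite author's own statement) =====
-- stated objective: alternative
-- what changed: B recursively consumes whole runs of consecutive equal scores (run length found by a scan) until a quota of TOP_RESULTS_NUMBER entries is met, instead of A's slice of the top 3 plus an early-exit append loop keyed on the third element's score.
import Mathlib
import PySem

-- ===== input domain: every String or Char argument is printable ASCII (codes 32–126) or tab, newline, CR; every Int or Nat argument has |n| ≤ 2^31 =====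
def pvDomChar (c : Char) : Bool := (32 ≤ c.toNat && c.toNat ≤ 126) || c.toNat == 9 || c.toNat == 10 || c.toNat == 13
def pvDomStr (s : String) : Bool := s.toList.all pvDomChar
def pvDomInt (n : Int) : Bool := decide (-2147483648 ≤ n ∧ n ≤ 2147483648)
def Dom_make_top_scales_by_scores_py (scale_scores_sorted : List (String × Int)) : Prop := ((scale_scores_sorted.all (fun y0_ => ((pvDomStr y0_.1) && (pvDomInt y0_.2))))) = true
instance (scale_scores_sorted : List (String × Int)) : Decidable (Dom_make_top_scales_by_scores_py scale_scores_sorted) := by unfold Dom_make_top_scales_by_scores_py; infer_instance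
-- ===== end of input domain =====

-- B recursively consumes whole runs of consecutive equal scores until a quota of 3 entries
-- is met, instead of A's slice-of-three plus early-exit append loop; same cost (alternative).

-- ===== PORT A =====
-- the for-loop of A: state = user_top_features (acc); the early 'return' = stop recursing.
-- 'user_top_features[-1][-1]': acc is nonempty whenever Python evaluates it (a nonempty
-- tail forces |input| > 3, so acc holds 3 elements), hence the getD default is never used.
def pvLoopA : List (String × Int) → List (String × Int) → List (String × Int)
  | acc, [] => acc
  | acc, (scale, score) :: rest =>
      if score ≠ (PySem.List.pyGetD acc (-1) ("", 0)).2 then acc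
      else pvLoopA (acc ++ [(scale, score)]) rest

def make_top_scales_by_scores_py (scale_scores_sorted : List (String × Int)) : List (String × Int) :=
  pvLoopA (PySem.List.slice scale_scores_sorted none (some 3))
          (PySem.List.slice scale_scores_sorted (some 3) none)

-- ===== PORT B =====
-- Source B's next_run_length while-loop: the guard checks n < len(pairs) before indexing,
-- so the getD default is never used; exact step-for-step port of the loop.
def pvNextRun (pairs : List (String × Int)) (n : Nat) : Nat :=
  if n < pairs.length ∧ (pairs.getD n ("", 0)).2 = (pairs.getD 0 ("", 0)).2 then
    pvNextRun pairs (n + 1)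
  else n
termination_by pairs.length - n

-- the loop counter never decreases (needed for pvTakeRuns' termination)
theorem pvNextRun_ge (pairs : List (String × Int)) (n : Nat) : n ≤ pvNextRun pairs n := by
  induction n using pvNextRun.induct pairs with
  | case1 n h ih => rw [pvNextRun, if_pos h]; omega
  | case2 n h => rw [pvNextRun, if_neg h]

-- Source B's take_runs: if need <= 0 or not pairs: []; else pairs[:n] + take_runs(pairs[n:], need-n)
def pvTakeRuns (pairs : List (String × Int)) (need : Int) : List (String × Int) :=
  if need ≤ 0 ∨ pairs = [] then []
  else
    let n := pvNextRun pairs 1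
    pairs.take n ++ pvTakeRuns (pairs.drop n) (need - n)
termination_by pairs.length
decreasing_by
  simp only [List.length_drop]
  have h1 : 1 ≤ pvNextRun pairs 1 := pvNextRun_ge pairs 1
  have h2 : pairs.length ≠ 0 := by
    intro h0
    exact (by tauto : ¬ pairs = []) (List.eq_nil_of_length_eq_zero h0)
  omega

def make_top_scales_by_scores_py_alt (scale_scores_sorted : List (String × Int)) : List (String × Int) :=
  pvTakeRuns scale_scores_sorted 3

-- ===== PRECONDITION & SPEC =====
def Spec_make_top_scales_by_scores_py (scale_scores_sorted : List (String × Int)) (out : List (String × Int)) : Prop := out = make_top_scales_by_scores_py_alt scale_scores_sorted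
instance (scale_scores_sorted : List (String × Int)) (out : List (String × Int)) : Decidable (Spec_make_top_scales_by_scores_py scale_scores_sorted out) := by unfold Spec_make_top_scales_by_scores_py; infer_instance

-- ===== CLAIM (what is proved, stated in full; the proofs are below) =====
def Claim_equal_make_top_scales_by_scores_py : Prop := ∀ (scale_scores_sorted : List (String × Int)), Dom_make_top_scales_by_scores_py scale_scores_sorted → Spec_make_top_scales_by_scores_py scale_scores_sorted (make_top_scales_by_scores_py scale_scores_sorted)

-- ===== LEMMAS AND PROOFS =====

-- A's loop, started on an acc ending in an element of score t, appends exactly the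
-- longest prefix of the tail whose scores equal t.
theorem pvLoopA_char (t : Int) :
    ∀ (rest pre : List (String × Int)) (x : String × Int), x.2 = t →
      pvLoopA (pre ++ [x]) rest
        = (pre ++ [x]) ++ rest.takeWhile (fun p => decide (p.2 = t)) := by
  intro rest
  induction rest with
  | nil => intro pre x hx; simp [pvLoopA]
  | cons hd tl ih =>
    intro pre x hx
    obtain ⟨s, sc⟩ := hd
    by_cases hsc : sc = t
    · have hstep : pvLoopA (pre ++ [x]) ((s, sc) :: tl)
          = pvLoopA ((pre ++ [x]) ++ [(s, sc)]) tl := by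
        simp [pvLoopA, PySem.List.pyGetD_neg_one_append_singleton, hx, hsc]
      rw [hstep, ih (pre ++ [x]) (s, sc) hsc]
      simp [hsc, List.append_assoc]
    · simp [pvLoopA, PySem.List.pyGetD_neg_one_append_singleton, hx, hsc]

-- takeWhile is no longer than the list
theorem pvLenTW {α : Type} (p : α → Bool) :
    ∀ l : List α, (l.takeWhile p).length ≤ l.length := by
  intro l
  induction l with
  | nil => simp
  | cons x xs ih =>
    by_cases h : p x
    · simp [List.takeWhile_cons, h]; omega
    · simp [List.takeWhile_cons, h]

-- takeWhile walks through a block that satisfies p wholesale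
theorem pvTWappendAll {α : Type} (p : α → Bool) :
    ∀ l1 l2 : List α, (∀ x ∈ l1, p x = true) →
      (l1 ++ l2).takeWhile p = l1 ++ l2.takeWhile p := by
  intro l1
  induction l1 with
  | nil => intro l2 _; simp
  | cons x xs ih =>
    intro l2 hall
    have hx : p x = true := hall x (by simp)
    simp only [List.cons_append, List.takeWhile_cons, hx, if_pos]
    rw [ih l2 (fun y hy => hall y (by simp [hy]))]

-- takeWhile of a dropWhile remainder is empty
theorem pvTWdropWhile {α : Type} (p : α → Bool) :
    ∀ l : List α, ((l.dropWhile p).takeWhile p) = [] := by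
  intro l
  induction l with
  | nil => simp
  | cons x xs ih =>
    by_cases h : p x
    · simpa [List.dropWhile_cons, h] using ih
    · simp [List.dropWhile_cons, h, List.takeWhile_cons]

-- pvNextRun from counter n measures n plus the leading run (of the head's score) in drop n
theorem pvNextRun_spec (pairs : List (String × Int)) :
    ∀ fuel n, pairs.length - n ≤ fuel →
      pvNextRun pairs n
        = n + ((pairs.drop n).takeWhile
            (fun q => decide (q.2 = (pairs.getD 0 ("", 0)).2))).length := by
  intro fuel
  induction fuel with
  | zero =>
    intro n hn
    have hlen : pairs.length ≤ n := by omega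
    have hdrop : pairs.drop n = [] := List.drop_eq_nil_of_le hlen
    rw [pvNextRun, if_neg (by intro h; omega), hdrop]
    simp
  | succ fuel ih =>
    intro n hn
    by_cases hlt : n < pairs.length
    · have hdrop : pairs.drop n = pairs[n] :: pairs.drop (n + 1) :=
        List.drop_eq_getElem_cons hlt
      have hgetD : pairs.getD n ("", 0) = pairs[n] := List.getD_eq_getElem pairs _ hlt
      by_cases heq : (pairs[n]).2 = (pairs.getD 0 ("", 0)).2
      · rw [pvNextRun, if_pos ⟨hlt, by rw [hgetD]; exact heq⟩,
            ih (n + 1) (by omega), hdrop, List.takeWhile_cons,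
            if_pos (decide_eq_true heq), List.length_cons]
        omega
      · rw [pvNextRun, if_neg (by rw [hgetD]; intro hc; exact heq hc.2), hdrop,
            List.takeWhile_cons, if_neg (by intro hc; exact heq (of_decide_eq_true hc))]
        simp
    · have hdrop : pairs.drop n = [] := List.drop_eq_nil_of_le (by omega)
      rw [pvNextRun, if_neg (by intro h; omega), hdrop]
      simp

-- on a cons, the first run has length 1 + the leading tied block of the tail
theorem pvNextRun_cons (p : String × Int) (rest : List (String × Int)) :
    pvNextRun (p :: rest) 1
      = 1 + (rest.takeWhile (fun x => decide (x.2 = p.2))).length := by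
  have h := pvNextRun_spec (p :: rest) (p :: rest).length 1 (by omega)
  simpa using h

theorem pvNextRun_cons_le (p : String × Int) (rest : List (String × Int)) :
    pvNextRun (p :: rest) 1 ≤ (p :: rest).length := by
  rw [pvNextRun_cons]
  have := pvLenTW (fun x : String × Int => decide (x.2 = p.2)) rest
  simp
  omega

-- with quota at least the whole list, take_runs returns the list unchanged
theorem pvTakeRuns_all :
    ∀ (m : Nat) (pairs : List (String × Int)) (need : Int), pairs.length ≤ m →
      (pairs.length : Int) ≤ need → pvTakeRuns pairs need = pairs := by
  intro m
  induction m with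
  | zero =>
    intro pairs need hm _
    have : pairs = [] := List.eq_nil_of_length_eq_zero (by omega)
    subst this
    rw [pvTakeRuns, if_pos (Or.inr rfl)]
  | succ m ih =>
    intro pairs need hm hneed
    rcases pairs with _ | ⟨p, rest⟩
    · rw [pvTakeRuns, if_pos (Or.inr rfl)]
    · have hneedpos : ¬ (need ≤ 0 ∨ p :: rest = []) := by
        push_neg; constructor
        · have : (0 : Int) < (p :: rest).length := by
            simp
          omega
        · simp
      rw [pvTakeRuns, if_neg hneedpos]
      have h1 : 1 ≤ pvNextRun (p :: rest) 1 := pvNextRun_ge _ 1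
      have hnlen : pvNextRun (p :: rest) 1 ≤ (p :: rest).length := pvNextRun_cons_le p rest
      have hrec : pvTakeRuns ((p :: rest).drop (pvNextRun (p :: rest) 1))
            (need - (pvNextRun (p :: rest) 1 : Nat))
          = (p :: rest).drop (pvNextRun (p :: rest) 1) := by
        apply ih
        · simp only [List.length_drop]
          simp at hm ⊢
          omega
        · simp only [List.length_drop]
          push_cast [Nat.cast_sub hnlen]
          omega
      simp only [hrec]
      exact List.take_append_drop _ _

-- key characterisation of B: for 0 < k ≤ |pairs|, take_runs pairs k = the first k elements
-- plus the following run of elements tied with element k-1's score.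
theorem pvTakeRuns_char :
    ∀ (m k : Nat) (pairs : List (String × Int)), pairs.length ≤ m →
      0 < k → k ≤ pairs.length →
      pvTakeRuns pairs (k : Int)
        = pairs.take k ++ (pairs.drop k).takeWhile
            (fun q => decide (q.2 = (pairs.getD (k - 1) ("", 0)).2)) := by
  intro m
  induction m with
  | zero => intro k pairs hm hk hkl; omega
  | succ m ih =>
    intro k pairs hm hk hkl
    rcases pairs with _ | ⟨p, rest⟩
    · simp at hkl; omega
    rcases k with _ | j
    · omega
    have hcond : ¬ (((j + 1 : Nat) : Int) ≤ 0 ∨ p :: rest = []) := by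
      push_neg
      refine ⟨by push_cast; omega, by simp⟩
    rw [pvTakeRuns, if_neg hcond, pvNextRun_cons]
    -- decompose the tail into its leading tied block t and the remainder d
    have htd : rest.takeWhile (fun x => decide (x.2 = p.2))
        ++ rest.dropWhile (fun x => decide (x.2 = p.2)) = rest :=
      List.takeWhile_append_dropWhile
    have hall : ∀ x ∈ rest.takeWhile (fun x => decide (x.2 = p.2)),
        (fun x : String × Int => decide (x.2 = p.2)) x = true :=
      fun x hx => List.mem_takeWhile_imp (p := fun x : String × Int => decide (x.2 = p.2)) (l := rest) hx
    have hdnil : ((rest.dropWhile (fun x => decide (x.2 = p.2))).takeWhile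
        (fun x : String × Int => decide (x.2 = p.2))) = [] := pvTWdropWhile _ rest
    -- generalize over the two blocks, then substitute
    have key : ∀ t d : List (String × Int),
        (∀ x ∈ t, (fun x : String × Int => decide (x.2 = p.2)) x = true) →
        (d.takeWhile (fun x : String × Int => decide (x.2 = p.2))) = [] →
        rest = t ++ d → d.length ≤ m → j + 1 ≤ (p :: rest).length →
        (p :: rest).take (1 + t.length)
            ++ pvTakeRuns ((p :: rest).drop (1 + t.length))
                (((j + 1 : Nat) : Int) - ((1 + t.length : Nat) : Int))
          = (p :: rest).take (j + 1) ++ ((p :: rest).drop (j + 1)).takeWhile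
              (fun q => decide (q.2 = ((p :: rest).getD (j + 1 - 1) ("", 0)).2)) := by
      intro t d hmemt hdtw hrtd hdm hjlen
      subst hrtd
      have htake1 : (p :: (t ++ d)).take (1 + t.length) = p :: t := by
        rw [show 1 + t.length = t.length + 1 from by omega, List.take_succ_cons,
            List.take_left]
      have hdrop1 : (p :: (t ++ d)).drop (1 + t.length) = d := by
        rw [show 1 + t.length = t.length + 1 from by omega, List.drop_succ_cons,
            List.drop_left]
      rw [htake1, hdrop1]
      simp only [List.length_cons, List.length_append] at hjlen
      by_cases hkn : j ≤ t.length
      · -- the first run covers the quota: the recursive call gets a non-positive quota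
        have hrec : pvTakeRuns d (((j + 1 : Nat) : Int) - ((1 + t.length : Nat) : Int))
            = [] := by
          rw [pvTakeRuns, if_pos (Or.inl (by push_cast; omega))]
        rw [hrec, List.append_nil]
        -- element j of p :: t ++ d carries p's score
        have hscore : ((p :: (t ++ d)).getD (j + 1 - 1) ("", 0)).2 = p.2 := by
          rcases Nat.eq_zero_or_pos j with h0 | h0
          · subst h0; rfl
          · have hjt : j - 1 < t.length := by omega
            have hget : (p :: (t ++ d)).getD (j + 1 - 1) ("", 0)
                = t[j-1]'hjt := by
              rw [show j + 1 - 1 = (j - 1) + 1 from by omega]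
              show (t ++ d).getD (j - 1) ("", 0) = _
              rw [List.getD_eq_getElem _ _ (by simp; omega),
                  List.getElem_append_left]
            rw [hget]
            exact of_decide_eq_true (hmemt _ (List.getElem_mem hjt))
          -- the index is inside the tied block, whose members all score p.2
        simp only [hscore]
        have htakek : (p :: (t ++ d)).take (j + 1) = p :: t.take j := by
          rw [List.take_succ_cons, List.take_append_of_le_length hkn]
        have hdropk : (p :: (t ++ d)).drop (j + 1) = t.drop j ++ d := by
          rw [List.drop_succ_cons, List.drop_append_of_le_length hkn]
        rw [htakek, hdropk,
            pvTWappendAll _ (t.drop j) d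
              (fun x hx => hmemt x (List.mem_of_mem_drop hx)),
            hdtw, List.append_nil]
        simp [List.take_append_drop]
      · -- the run is shorter than the quota: recurse on the remainder d
        push_neg at hkn
        have hrec := ih (j + 1 - (1 + t.length)) d hdm (by omega) (by omega)
        have hcast : ((j + 1 : Nat) : Int) - ((1 + t.length : Nat) : Int)
            = ((j + 1 - (1 + t.length) : Nat) : Int) := by push_cast; omega
        rw [hcast, hrec]
        have hgd : (p :: (t ++ d)).getD (j + 1 - 1) ("", 0)
            = d.getD (j + 1 - (1 + t.length) - 1) ("", 0) := by
          have h2 : j < ((p :: t) ++ d).length := by simp; omega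
          show ((p :: t) ++ d).getD j ("", 0) = _
          rw [List.getD_eq_getElem _ _ h2,
              List.getD_eq_getElem _ _ (by omega),
              List.getElem_append_right (by simp; omega)]
          congr 1
          simp only [List.length_cons]
          omega
        have htakek : (p :: (t ++ d)).take (j + 1)
            = p :: (t ++ d.take (j - t.length)) := by
          rw [List.take_succ_cons, List.take_append,
              List.take_of_length_le (by omega)]
        have hdropk : (p :: (t ++ d)).drop (j + 1) = d.drop (j - t.length) := by
          rw [List.drop_succ_cons, List.drop_append,
              List.drop_eq_nil_of_le (by omega), List.nil_append]
        rw [htakek, hdropk, hgd,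
            show j + 1 - (1 + t.length) = j - t.length from by omega]
        simp [List.append_assoc]
    have := key (rest.takeWhile (fun x => decide (x.2 = p.2)))
      (rest.dropWhile (fun x => decide (x.2 = p.2))) hall hdnil htd.symm
      (by
        have h1 := congrArg List.length htd
        simp only [List.length_append] at h1
        simp only [List.length_cons] at hm
        omega)
      hkl
    exact this

theorem make_top_eq (l : List (String × Int)) :
    make_top_scales_by_scores_py l = make_top_scales_by_scores_py_alt l := by
  by_cases hlen : l.length ≤ 3
  · have hdrop : l.drop 3 = [] := by simp [List.drop_eq_nil_iff]; omega
    have htake : l.take 3 = l := List.take_of_length_le hlen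
    have hB : make_top_scales_by_scores_py_alt l = l := by
      unfold make_top_scales_by_scores_py_alt
      exact pvTakeRuns_all l.length l 3 le_rfl (by exact_mod_cast hlen)
    simp [make_top_scales_by_scores_py, hB,
          PySem.List.slice_to, PySem.List.slice_from, hdrop, htake, pvLoopA]
  · rcases l with _ | ⟨a, l⟩; · simp at hlen
    rcases l with _ | ⟨b, l⟩; · simp at hlen
    rcases l with _ | ⟨c, rest⟩; · simp at hlen
    -- A's side: [a,b,c] ++ leading run of c-tied elements of rest
    have hloop : pvLoopA [a, b, c] rest
        = [a, b, c] ++ rest.takeWhile (fun p => decide (p.2 = c.2)) := by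
      simpa using pvLoopA_char c.2 rest [a, b] c rfl
    have hslt : PySem.List.slice (a :: b :: c :: rest) none (some 3) = [a, b, c] := by
      rw [PySem.List.slice_to]; · rfl
      · norm_num
    have hslf : PySem.List.slice (a :: b :: c :: rest) (some 3) none = rest := by
      rw [PySem.List.slice_from]; · rfl
      · norm_num
    have hA : make_top_scales_by_scores_py (a :: b :: c :: rest)
        = [a, b, c] ++ rest.takeWhile (fun p => decide (p.2 = c.2)) := by
      rw [make_top_scales_by_scores_py, hslt, hslf, hloop]
    -- B's side via the characterisation at k = 3
    have hB := pvTakeRuns_char (a :: b :: c :: rest).length 3 (a :: b :: c :: rest)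
      le_rfl (by omega) (by omega)
    have hgd : ((a :: b :: c :: rest).getD (3 - 1) ("", 0)) = c := rfl
    rw [hA, make_top_scales_by_scores_py_alt, show ((3:Int)) = ((3:Nat):Int) by norm_num,
        hB, hgd]
    rfl

-- ===== VERDICT (by name: the statement is the Claim_ definition above) =====
theorem make_top_scales_by_scores_py_spec : Claim_equal_make_top_scales_by_scores_py := by
  intro l _
  unfold Spec_make_top_scales_by_scores_py
  exact make_top_eq l
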